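-- pv_equiv track=rewrite | github.com/solovieved/iba_python | lab3/1.py | cut_rectangle
-- ===== SOURCE A (Python) =====
-- def cut_rectangle(a, b):
--     if a == 0 or b == 0:
--         return []
--
--     sides = []
--     side = min(a, b)
--     sides.append(side)
--
--     if a > b:
--         sides.extend(cut_rectangle(a - side, b))
--     else:
--         sides.extend(cut_rectangle(a, b - side))
--
--     return sides
-- ===== SOURCE B (Python) =====
-- def cut_rectangle(a, b):
--     sides = []
--     while a > 0 and b > 0:
--         if a >= b:
--             sides += [b] * (a // b)
--             a %= b
--         else:
--             sides += [a] * (b // a)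
--             b %= a
--     return sides
-- ===== Notes on version B (the rewrite author's own statement) =====
-- stated objective: alternative
-- what changed: Replaces the one-square-per-recursive-call subtraction with an iterative Euclidean-algorithm loop that emits all q = a//b equal squares of a step at once via list repetition and reduces with the remainder, so control runs once per gcd step instead of once per square and no suffix is re-copied by extend.
-- intended difference: On negative equal dimensions a = b < 0 A returns [a], a phantom square with a negative side, while B returns [], the intended empty decomposition of a rectangle with no positive area. — e.g. on cut_rectangle(-1, -1): A returns [-1], B returns []
import Mathlib
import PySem

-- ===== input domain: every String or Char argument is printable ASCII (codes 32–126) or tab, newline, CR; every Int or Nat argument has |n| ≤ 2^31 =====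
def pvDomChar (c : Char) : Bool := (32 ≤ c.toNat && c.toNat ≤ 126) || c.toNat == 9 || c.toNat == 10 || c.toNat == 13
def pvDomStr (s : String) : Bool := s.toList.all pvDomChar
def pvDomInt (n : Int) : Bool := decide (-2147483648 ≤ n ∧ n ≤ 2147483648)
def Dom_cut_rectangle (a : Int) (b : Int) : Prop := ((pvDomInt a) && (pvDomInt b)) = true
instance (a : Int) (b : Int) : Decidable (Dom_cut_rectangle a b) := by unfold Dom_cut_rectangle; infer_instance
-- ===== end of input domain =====

-- B replaces A's one-square-per-call recursion with a Euclidean division loop emitting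
-- whole runs of equal squares at once (return-value equivalence on Pre_).
-- ===== PORT A =====
-- fuel makes A's recursion total in Lean; on Pre_ the fuel is never exhausted (otherwise the recursion is literal)
def cutRecA : Nat → Int → Int → List Int
  | 0, _, _ => []
  | n+1, a, b =>
    if a = 0 ∨ b = 0 then []
    else
      let side := min a b
      if a > b then side :: cutRecA n (a - side) b
      else side :: cutRecA n a (b - side)

def cut_rectangle (a : Int) (b : Int) : List Int :=
  cutRecA (a.toNat + b.toNat + 1) a b

-- ===== PORT B =====
-- fuel makes B's while loop total in Lean; on Pre_ the fuel is never exhausted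
def cutLoopB : Nat → Int → Int → List Int → List Int
  | 0, _, _, sides => sides
  | n+1, a, b, sides =>
    if a > 0 ∧ b > 0 then
      if a ≥ b then
        cutLoopB n (PySem.Int.mod a b) b (sides ++ List.replicate (PySem.Int.floordiv a b).toNat b)
      else
        cutLoopB n a (PySem.Int.mod b a) (sides ++ List.replicate (PySem.Int.floordiv b a).toNat a)
    else sides

def cut_rectangle_alt (a : Int) (b : Int) : List Int :=
  cutLoopB (a.toNat + b.toNat + 1) a b []

-- ===== PRECONDITION & SPEC =====
-- Pre_ excludes exactly the inputs on which A never returns (RecursionError): a negative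
-- dimension with the two dimensions nonzero and unequal.
def Pre_cut_rectangle (a : Int) (b : Int) : Prop := (0 ≤ a ∧ 0 ≤ b) ∨ a = 0 ∨ b = 0 ∨ a = b
instance (a : Int) (b : Int) : Decidable (Pre_cut_rectangle a b) := by unfold Pre_cut_rectangle; infer_instance
def pvWitness_cut_rectangle : Int × Int := (5, 3)

-- On a = b < 0 A returns [a], a single "square" with negative side; B returns [], the
-- intended empty decomposition of a degenerate rectangle.
def D_cut_rectangle (a : Int) (b : Int) : Prop := a = b ∧ a < 0
instance (a : Int) (b : Int) : Decidable (D_cut_rectangle a b) := by unfold D_cut_rectangle; infer_instance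
def Spec_cut_rectangle (a : Int) (b : Int) (out : List Int) : Prop := ¬ D_cut_rectangle a b → out = cut_rectangle_alt a b
instance (a : Int) (b : Int) (out : List Int) : Decidable (Spec_cut_rectangle a b out) := by unfold Spec_cut_rectangle; infer_instance
def pvDiffWitness_cut_rectangle : Int × Int := (-1, -1)
def pvDiffWitnessOut_cut_rectangle : (List Int) × (List Int) := ([-1], [])

-- ===== CLAIM (what is proved, stated in full; the proofs are below) =====
def Claim_unchanged_cut_rectangle : Prop := ∀ (a : Int) (b : Int), Dom_cut_rectangle a b → Pre_cut_rectangle a b → Spec_cut_rectangle a b (cut_rectangle a b)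
def Claim_changed_cut_rectangle : Prop := Dom_cut_rectangle (pvDiffWitness_cut_rectangle.1) (pvDiffWitness_cut_rectangle.2) ∧ Pre_cut_rectangle (pvDiffWitness_cut_rectangle.1) (pvDiffWitness_cut_rectangle.2) ∧ D_cut_rectangle (pvDiffWitness_cut_rectangle.1) (pvDiffWitness_cut_rectangle.2) ∧ cut_rectangle (pvDiffWitness_cut_rectangle.1) (pvDiffWitness_cut_rectangle.2) = pvDiffWitnessOut_cut_rectangle.1 ∧ cut_rectangle_alt (pvDiffWitness_cut_rectangle.1) (pvDiffWitness_cut_rectangle.2) = pvDiffWitnessOut_cut_rectangle.2 ∧ pvDiffWitnessOut_cut_rectangle.1 ≠ pvDiffWitnessOut_cut_rectangle.2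
def Claim_exact_cut_rectangle : Prop := ∀ (a : Int) (b : Int), Dom_cut_rectangle a b → Pre_cut_rectangle a b → D_cut_rectangle a b → cut_rectangle a b ≠ cut_rectangle_alt a b

-- ===== LEMMAS AND PROOFS =====

-- A's fuelled recursion does not depend on the fuel once it exceeds a.toNat + b.toNat.
theorem cutRecA_fuel : ∀ (n m : Nat) (a b : Int), 0 ≤ a → 0 ≤ b →
    a.toNat + b.toNat < n → a.toNat + b.toNat < m → cutRecA n a b = cutRecA m a b := by
  intro n
  induction n with
  | zero => intro m a b _ _ h _; omega
  | succ n ih =>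
    intro m a b ha hb hn hm
    obtain ⟨m', rfl⟩ : ∃ m', m = m' + 1 := ⟨m - 1, by omega⟩
    by_cases hz : a = 0 ∨ b = 0
    · simp [cutRecA, hz]
    · have ha1 : 1 ≤ a := by omega
      have hb1 : 1 ≤ b := by omega
      simp only [cutRecA, if_neg (by tauto : ¬ (a = 0 ∨ b = 0))]
      by_cases hab : a > b
      · have hs : min a b = b := by omega
        rw [hs, if_pos hab, if_pos hab,
          ih m' (a - b) b (by omega) hb (by omega) (by omega)]
      · have hs : min a b = a := by omega
        rw [hs, if_neg hab, if_neg hab,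
          ih m' a (b - a) ha (by omega) (by omega) (by omega)]

-- A with zero height returns [] at any fuel.
theorem cutRecA_zero_right (n : Nat) (a : Int) : cutRecA n a 0 = [] := by
  cases n <;> simp [cutRecA]

-- A with zero width returns [] at any fuel.
theorem cutRecA_zero_left (n : Nat) (b : Int) : cutRecA n 0 b = [] := by
  cases n <;> simp [cutRecA]

-- Peeling q subtractions of b from a = r + q*b (the a ≥ b side of A's recursion).
theorem cutRecA_peel_left : ∀ (q : Nat), ∀ (r b : Int) (n : Nat), 0 < b → 0 ≤ r → r < b →
    (r + (q : Int) * b).toNat + b.toNat < n →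
    cutRecA n (r + (q : Int) * b) b = List.replicate q b ++ cutRecA n r b := by
  intro q
  induction q with
  | zero => intro r b n _ _ _ _; simp
  | succ q ih =>
    intro r b n hb hr0 hrb hn
    have hq0 : (0 : Int) ≤ (q : Int) := by positivity
    have hqb : (0 : Int) ≤ (q : Int) * b := by positivity
    obtain ⟨n', rfl⟩ : ∃ n', n = n' + 1 := ⟨n - 1, by omega⟩
    push_cast at hn ⊢
    have ha : 0 < r + ((q : Int) + 1) * b := by nlinarith
    have hstep : r + ((q : Int) + 1) * b - b = r + (q : Int) * b := by ring
    have hxy : ((q : Int) + 1) * b = (q : Int) * b + b := by ring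
    by_cases hgt : r + ((q : Int) + 1) * b > b
    · rw [cutRecA_fuel (n' + 1) n' r b hr0 (by omega) (by omega) (by omega)]
      simp only [cutRecA, if_neg (by omega : ¬ (r + ((q : Int) + 1) * b = 0 ∨ b = 0))]
      have hs : min (r + ((q : Int) + 1) * b) b = b := by omega
      rw [hs, if_pos hgt, hstep, ih r b n' hb hr0 hrb (by omega)]
      simp [List.replicate_succ]
    · -- then r = 0 and q = 0: the rectangle is exactly one square
      have hr : r = 0 := by nlinarith
      have hq : q = 0 := by
        by_contra h
        have h1 : (1 : Int) ≤ (q : Int) := by exact_mod_cast Nat.one_le_iff_ne_zero.mpr h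
        nlinarith
      subst hr; subst hq
      have hb' : (0 : Int) + (((0 : Nat) : Int) + 1) * b = b := by push_cast; ring
      rw [hb', cutRecA_zero_left]
      simp only [cutRecA, if_neg (by omega : ¬ (b = 0 ∨ b = 0))]
      rw [min_self, if_neg (by omega : ¬ b > b), show b - b = (0 : Int) by ring,
        cutRecA_zero_right]
      simp

-- Peeling q subtractions of a from b = r + q*a (the a ≤ b side of A's recursion).
theorem cutRecA_peel_right : ∀ (q : Nat), ∀ (a r : Int) (n : Nat), 0 < a → 0 ≤ r → r < a →
    a.toNat + (r + (q : Int) * a).toNat < n →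
    cutRecA n a (r + (q : Int) * a) = List.replicate q a ++ cutRecA n a r := by
  intro q
  induction q with
  | zero => intro a r n _ _ _ _; simp
  | succ q ih =>
    intro a r n ha hr0 hra hn
    have hq0 : (0 : Int) ≤ (q : Int) := by positivity
    have hqa : (0 : Int) ≤ (q : Int) * a := by positivity
    obtain ⟨n', rfl⟩ : ∃ n', n = n' + 1 := ⟨n - 1, by omega⟩
    push_cast at hn ⊢
    have hb : 0 < r + ((q : Int) + 1) * a := by nlinarith
    have hstep : r + ((q : Int) + 1) * a - a = r + (q : Int) * a := by ring
    have hab : a ≤ r + ((q : Int) + 1) * a := by nlinarith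
    have hxy : ((q : Int) + 1) * a = (q : Int) * a + a := by ring
    rw [cutRecA_fuel (n' + 1) n' a r (by omega) hr0 (by omega) (by omega)]
    simp only [cutRecA, if_neg (by omega : ¬ (a = 0 ∨ r + ((q : Int) + 1) * a = 0))]
    have hs : min a (r + ((q : Int) + 1) * a) = a := by omega
    rw [hs, if_neg (by omega : ¬ a > r + ((q : Int) + 1) * a), hstep,
      ih a r n' ha hr0 hra (by omega)]
    simp [List.replicate_succ]

-- Main invariant: the Euclidean loop of B produces A's square list after the accumulator.
theorem cutLoopB_eq : ∀ (s : Nat), ∀ (a b : Int) (n m : Nat) (sides : List Int),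
    0 ≤ a → 0 ≤ b → a.toNat + b.toNat ≤ s → a.toNat + b.toNat < n → a.toNat + b.toNat < m →
    cutLoopB n a b sides = sides ++ cutRecA m a b := by
  intro s
  induction s using Nat.strong_induction_on with
  | _ s ih =>
    intro a b n m sides ha hb hs hn hm
    obtain ⟨n', rfl⟩ : ∃ n', n = n' + 1 := ⟨n - 1, by omega⟩
    obtain ⟨m', rfl⟩ : ∃ m', m = m' + 1 := ⟨m - 1, by omega⟩
    by_cases hz : a > 0 ∧ b > 0
    · obtain ⟨ha0, hb0⟩ := hz
      simp only [cutLoopB, if_pos (And.intro ha0 hb0)]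
      by_cases hab : a ≥ b
      · -- q = a // b ≥ 1, r = a % b ∈ [0, b)
        have hfd : PySem.Int.floordiv a b = a / b := PySem.Int.floordiv_eq_ediv_of_pos hb0
        have hmd : PySem.Int.mod a b = a % b := PySem.Int.mod_eq_emod_of_pos hb0
        have hr0 : 0 ≤ a % b := Int.emod_nonneg a (by omega)
        have hrb : a % b < b := Int.emod_lt_of_pos a hb0
        have hq1 : 1 ≤ a / b := by rw [Int.le_ediv_iff_mul_le hb0]; omega
        have hqd : ((a / b).toNat : Int) = a / b := Int.toNat_of_nonneg (by omega)
        have hdm : a % b + (((a / b).toNat : Int)) * b = a := by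
          have h := Int.mul_ediv_add_emod a b
          rw [hqd]; linarith [h, mul_comm b (a / b)]
        rw [if_pos hab, hfd, hmd]
        rw [show cutRecA (m' + 1) a b
            = cutRecA (m' + 1) (a % b + (((a / b).toNat : Int)) * b) b by rw [hdm]]
        rw [cutRecA_peel_left (a / b).toNat (a % b) b (m' + 1) hb0 hr0 hrb (by rw [hdm]; omega)]
        rw [ih (s - 1) (by omega) (a % b) b n' (m' + 1) _ hr0 (by omega)
          (by omega) (by omega) (by omega)]
        simp
      · -- symmetric: q = b // a ≥ 1, r = b % a ∈ [0, a)
        have hba : a ≤ b := by omega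
        have hfd : PySem.Int.floordiv b a = b / a := PySem.Int.floordiv_eq_ediv_of_pos ha0
        have hmd : PySem.Int.mod b a = b % a := PySem.Int.mod_eq_emod_of_pos ha0
        have hr0 : 0 ≤ b % a := Int.emod_nonneg b (by omega)
        have hra : b % a < a := Int.emod_lt_of_pos b ha0
        have hq1 : 1 ≤ b / a := by rw [Int.le_ediv_iff_mul_le ha0]; omega
        have hqd : ((b / a).toNat : Int) = b / a := Int.toNat_of_nonneg (by omega)
        have hdm : b % a + (((b / a).toNat : Int)) * a = b := by
          have h := Int.mul_ediv_add_emod b a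
          rw [hqd]; linarith [h, mul_comm a (b / a)]
        rw [if_neg hab, hfd, hmd]
        rw [show cutRecA (m' + 1) a b
            = cutRecA (m' + 1) a (b % a + (((b / a).toNat : Int)) * a) by rw [hdm]]
        rw [cutRecA_peel_right (b / a).toNat a (b % a) (m' + 1) ha0 hr0 hra (by rw [hdm]; omega)]
        rw [ih (s - 1) (by omega) a (b % a) n' (m' + 1) _ ha hr0 (by omega)
          (by omega) (by omega)]
        simp
    · have hz' : a = 0 ∨ b = 0 := by omega
      simp [cutLoopB, cutRecA, hz, hz']

-- ===== VERDICT (by name: the statements are the Claim_ definitions above) =====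
theorem cut_rectangle_spec : Claim_unchanged_cut_rectangle := by
  intro a b _ hpre hnd
  unfold D_cut_rectangle at hnd
  unfold cut_rectangle cut_rectangle_alt
  rcases hpre with ⟨ha, hb⟩ | hz | hz | hz
  · rw [cutLoopB_eq (a.toNat + b.toNat) a b (a.toNat + b.toNat + 1) (a.toNat + b.toNat + 1)
      [] ha hb (by omega) (by omega) (by omega)]
    simp
  · simp [cutLoopB, cutRecA, hz]
  · simp [cutLoopB, cutRecA, hz]
  · -- a = b: if positive the main invariant applies, otherwise ¬D_ forces a = b = 0
    subst hz
    by_cases hpos : 0 ≤ a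
    · rw [cutLoopB_eq (a.toNat + a.toNat) a a (a.toNat + a.toNat + 1) (a.toNat + a.toNat + 1)
        [] hpos hpos (by omega) (by omega) (by omega)]
      simp
    · exact absurd ⟨rfl, by omega⟩ hnd

theorem cut_rectangle_changed : Claim_changed_cut_rectangle := by
  unfold Claim_changed_cut_rectangle; decide

theorem cut_rectangle_tight : Claim_exact_cut_rectangle := by
  intro a b _ _ hd
  obtain ⟨rfl, hneg⟩ := hd
  have ht : a.toNat = 0 := by omega
  unfold cut_rectangle cut_rectangle_alt
  rw [ht]
  simp only [cutRecA, cutLoopB]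
  rw [if_neg (show ¬ (a = 0 ∨ a = 0) by omega), if_neg (show ¬ (a > 0 ∧ a > 0) by omega)]
  simp
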